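-- pv_equiv track=rewrite | github.com/Vyrnexis-e16s/sentinelops | backend/app/modules/siem/services/sigma.py | _split_condition_by_and
-- ===== SOURCE A (Python) =====
-- def _split_condition_by_and(expr: str) -> list[str]:
--     """Split on `` and `` (case-insensitive) without regex over arbitrary-length input."""
--     e = expr
--     n = len(e)
--     if n == 0:
--         return []
--     le = e.lower()
--     sep = " and "
--     L = len(sep)
--     parts: list[str] = []
--     start = 0
--     i = 0
--     while i <= n - L:
--         if le[i : i + L] == sep:
--             parts.append(e[start:i].strip())
--             start = i + L
--             i = start
--             continue
--         i += 1
--     parts.append(e[start:].strip())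
--     return [p for p in parts if p]
-- ===== SOURCE B (Python) =====
-- def _split_condition_by_and(expr: str) -> list[str]:
--     """Split on `` and `` (case-insensitive): lowercase once, split, then map the
--     piece lengths back onto the original string with a running offset."""
--     out: list[str] = []
--     start = 0
--     for piece in expr.lower().split(" and "):
--         seg = expr[start:start + len(piece)].strip()
--         if seg:
--             out.append(seg)
--         start += len(piece) + 5
--     return out
-- ===== Notes on version B (the rewrite author's own statement) =====
-- stated objective: faster
-- what changed: Replaces A's hand-written character-by-character index scan (manual start/i bookkeeping plus a trailing filter pass) by one str.split on the lowercased string, mapping each piece back onto the original string with a running offset and filtering inline.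
import Mathlib
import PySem

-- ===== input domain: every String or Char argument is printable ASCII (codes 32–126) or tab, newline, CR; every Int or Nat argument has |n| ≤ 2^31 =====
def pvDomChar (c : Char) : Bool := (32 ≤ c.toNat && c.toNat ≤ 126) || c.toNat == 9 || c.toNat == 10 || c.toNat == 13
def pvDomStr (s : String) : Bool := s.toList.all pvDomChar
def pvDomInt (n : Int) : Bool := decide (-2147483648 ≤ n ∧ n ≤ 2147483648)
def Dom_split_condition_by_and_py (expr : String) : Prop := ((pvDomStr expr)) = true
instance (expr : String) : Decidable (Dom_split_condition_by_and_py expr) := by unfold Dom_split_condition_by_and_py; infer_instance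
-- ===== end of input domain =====

-- B replaces A's hand-written character-by-character scan by a single split of the
-- lowercased string plus an offset map back onto the original (measured faster in a timing run).

-- ===== PORT A =====
-- the separator " and "
def pvSep : List Char := [' ', 'a', 'n', 'd', ' ']

-- A's while-loop: state (start, i, parts), literal step for step
def pvLoopA (e le : List Char) (n : Nat) (start i : Nat) (parts : List (List Char)) :
    List (List Char) :=
  if _h : i + 5 ≤ n then
    if PySem.List.slice le (some (i : Int)) (some ((i : Int) + 5)) = pvSep then
      pvLoopA e le n (i + 5) (i + 5)
        (parts ++ [PySem.Chars.strip (PySem.List.slice e (some (start : Int)) (some (i : Int)))])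
    else
      pvLoopA e le n start (i + 1) parts
  else
    parts ++ [PySem.Chars.strip (PySem.List.slice e (some (start : Int)) none)]
  termination_by n - i
  decreasing_by all_goals omega

def split_condition_by_and_py (expr : String) : List String :=
  let e := expr.toList
  let n := e.length
  if n = 0 then []
  else
    let le := PySem.Chars.lower e
    let parts := pvLoopA e le n 0 0 []
    (parts.filter (fun p => !p.isEmpty)).map (fun p => String.ofList p)

-- ===== PORT B =====
-- B's loop body: take the original-case slice of the piece's length, keep it if
-- nonempty after strip, advance the offset by len(piece) + 5
def pvStepB (e : List Char) (st : Nat × List (List Char)) (piece : List Char) :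
    Nat × List (List Char) :=
  let seg := PySem.Chars.strip
    (PySem.List.slice e (some (st.1 : Int)) (some ((st.1 : Int) + (piece.length : Int))))
  (st.1 + piece.length + 5, if seg.isEmpty then st.2 else st.2 ++ [seg])

def split_condition_by_and_py_alt (expr : String) : List String :=
  let e := expr.toList
  let pieces := PySem.Chars.splitOn (PySem.Chars.lower e) pvSep
  ((pieces.foldl (pvStepB e) (0, [])).2).map (fun p => String.ofList p)

-- ===== PRECONDITION & SPEC =====
def Spec_split_condition_by_and_py (expr : String) (out : List String) : Prop := out = split_condition_by_and_py_alt expr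
instance (expr : String) (out : List String) : Decidable (Spec_split_condition_by_and_py expr out) := by unfold Spec_split_condition_by_and_py; infer_instance

-- ===== CLAIM (what is proved, stated in full; the proofs are below) =====
def Claim_equal_split_condition_by_and_py : Prop := ∀ (expr : String), Dom_split_condition_by_and_py expr → Spec_split_condition_by_and_py expr (split_condition_by_and_py expr)

-- ===== LEMMAS AND PROOFS =====

-- splitOn.go with a nonempty accumulator just prepends its reverse
lemma pv_go_acc (sep : List Char) (fuel : Nat) :
    ∀ (l cur : List Char) (acc : List (List Char)),
      PySem.Chars.splitOn.go sep fuel l cur acc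
        = acc.reverse ++ PySem.Chars.splitOn.go sep fuel l cur [] := by
  induction fuel with
  | zero =>
      intro l cur acc
      rw [PySem.Chars.splitOn.go, PySem.Chars.splitOn.go]
      simp
  | succ f ih =>
      intro l cur acc
      cases l with
      | nil =>
          rw [PySem.Chars.splitOn.go, PySem.Chars.splitOn.go] <;> simp
      | cons c rest =>
          rw [PySem.Chars.splitOn.go, PySem.Chars.splitOn.go]
          by_cases hp : sep.isPrefixOf (c :: rest)
          · simp only [hp, if_true]
            rw [ih, ih (List.drop sep.length (c :: rest)) [] [cur.reverse]]
            simp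
          · simp only [hp, Bool.false_eq_true, if_false]
            exact ih rest (c :: cur) acc

-- when fewer than 5 chars remain, no " and " can occur: one final piece
lemma pv_go_short (fuel : Nat) :
    ∀ (l cur : List Char), l.length < 5 →
      PySem.Chars.splitOn.go pvSep fuel l cur [] = [cur.reverse ++ l] := by
  induction fuel with
  | zero =>
      intro l cur _
      rw [PySem.Chars.splitOn.go]; simp
  | succ f ih =>
      intro l cur hl
      cases l with
      | nil => rw [PySem.Chars.splitOn.go] <;> simp
      | cons c rest =>
          rw [PySem.Chars.splitOn.go]
          have hp : pvSep.isPrefixOf (c :: rest) = false := by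
            rw [Bool.eq_false_iff]
            intro h
            have h' : pvSep <+: (c :: rest) := List.isPrefixOf_iff_prefix.mp h
            have := List.IsPrefix.length_le h'
            simp [pvSep] at this
            simp at hl
            omega
          simp only [hp, Bool.false_eq_true, if_false]
          rw [ih rest (c :: cur) (by simp at hl ⊢; omega)]
          simp

-- the slice test in A is the isPrefixOf test in splitOn
lemma pv_slice_eq_sep_iff (le : List Char) (i : Nat) :
    (PySem.List.slice le (some (i : Int)) (some ((i : Int) + 5)) = pvSep)
      ↔ pvSep <+: le.drop i := by
  have h5 : ((i : Int) + 5) = (((i + 5 : Nat)) : Int) := by push_cast; ring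
  rw [h5, PySem.List.slice_natCast, Nat.add_sub_cancel_left, List.prefix_iff_eq_take]
  have : pvSep.length = 5 := rfl
  rw [this, eq_comm]

-- the parts accumulator of A's loop is append-only
lemma pv_loopA_parts (e le : List Char) (n : Nat) :
    ∀ (k start i : Nat) (parts : List (List Char)), n - i ≤ k →
      pvLoopA e le n start i parts = parts ++ pvLoopA e le n start i [] := by
  intro k
  induction k with
  | zero =>
      intro start i parts hk
      have h5 : ¬ i + 5 ≤ n := by omega
      conv_lhs => rw [pvLoopA]
      conv_rhs => rw [pvLoopA]
      simp [h5]
  | succ k ih =>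
      intro start i parts hk
      conv_lhs => rw [pvLoopA]
      conv_rhs => rw [pvLoopA]
      by_cases h5 : i + 5 ≤ n
      · simp only [h5, dif_pos]
        by_cases hm : PySem.List.slice le (some (i : Int)) (some ((i : Int) + 5)) = pvSep
        · simp only [hm, if_pos]
          rw [ih (i+5) (i+5) _ (by omega), ih (i+5) (i+5) ([] ++ _) (by omega)]
          simp
        · simp only [hm, if_false]
          rw [ih start (i+1) parts (by omega), ih start (i+1) [] (by omega)]
      · simp [h5]

-- short remainder: fold of the single final piece = A's loop exit
lemma pv_main_short (e le : List Char) (hlen : e.length = le.length)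
    (fuel i start : Nat) (outAcc : List (List Char))
    (hsi : start ≤ i) (hin : i ≤ le.length) (hshort : le.length < i + 5) :
    (List.foldl (pvStepB e) (start, outAcc)
        (PySem.Chars.splitOn.go pvSep fuel (le.drop i)
          (((le.drop start).take (i - start)).reverse) [])).2
      = outAcc ++ (pvLoopA e le le.length start i []).filter (fun p => !p.isEmpty) := by
  rw [pv_go_short fuel _ _ (by simp; omega)]
  have hpiece : ((le.drop start).take (i - start)).reverse.reverse ++ le.drop i
      = le.drop start := by
    rw [List.reverse_reverse]
    have hdd : le.drop i = (le.drop start).drop (i - start) := by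
      rw [List.drop_drop]
      congr 1
      omega
    rw [hdd, List.take_append_drop]
  rw [hpiece]
  have hlen2 : (le.drop start).length = le.length - start := by simp
  have hslice : PySem.List.slice e (some (start : Int))
      (some ((start : Int) + ((le.drop start).length : Int))) = e.drop start := by
    rw [PySem.List.slice_natCast_add, hlen2]
    exact List.take_of_length_le (by simp; omega)
  conv_rhs => rw [pvLoopA]
  have h5 : ¬ i + 5 ≤ le.length := by omega
  simp only [h5, dif_neg, not_false_iff, List.foldl_cons, List.foldl_nil, pvStepB, hslice]
  rw [PySem.List.slice_from_natCast]
  simp only [List.nil_append, List.filter_cons, List.filter_nil]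
  by_cases hemp : (PySem.Chars.strip (e.drop start)).isEmpty
  · simp [hemp]
  · simp only [hemp, Bool.false_eq_true, if_false, Bool.not_false, if_true]

-- MAIN: folding B's step over splitOn.go started mid-scan reproduces A's loop output (filtered)
lemma pv_main (e le : List Char) (hlen : e.length = le.length) :
    ∀ (fuel i start : Nat) (outAcc : List (List Char)),
      start ≤ i → i ≤ le.length → le.length - i ≤ fuel →
      (List.foldl (pvStepB e) (start, outAcc)
          (PySem.Chars.splitOn.go pvSep fuel (le.drop i)
            (((le.drop start).take (i - start)).reverse) [])).2
        = outAcc ++ (pvLoopA e le le.length start i []).filter (fun p => !p.isEmpty) := by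
  intro fuel
  induction fuel with
  | zero =>
      intro i start outAcc hsi hin hfuel
      exact pv_main_short e le hlen 0 i start outAcc hsi hin (by omega)
  | succ f ih =>
      intro i start outAcc hsi hin hfuel
      by_cases h5 : i + 5 ≤ le.length
      · -- at least 5 chars remain: le.drop i is a cons
        rcases hl : le.drop i with _ | ⟨c, rest⟩
        · exfalso
          have := congrArg List.length hl
          simp at this
          omega
        rw [PySem.Chars.splitOn.go]
        by_cases hp : pvSep <+: le.drop i
        · -- separator found at i
          have hp' : pvSep.isPrefixOf (c :: rest) = true := by
            rw [List.isPrefixOf_iff_prefix, ← hl]; exact hp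
          simp only [hp', if_pos]
          have hdrop : List.drop pvSep.length (c :: rest) = le.drop (i + 5) := by
            have : pvSep.length = 5 := rfl
            rw [this, ← hl, List.drop_drop]
          rw [hdrop, pv_go_acc, List.reverse_reverse]
          have hnilcur : ([] : List Char)
              = ((le.drop (i+5)).take ((i+5) - (i+5))).reverse := by simp
          have hplen : ((le.drop start).take (i - start)).length = i - start := by
            simp; omega
          simp only [List.reverse_singleton, List.cons_append, List.nil_append, List.foldl_cons]
          have hstep : pvStepB e (start, outAcc) ((le.drop start).take (i - start))
              = (i + 5, if (PySem.Chars.strip ((e.drop start).take (i - start))).isEmpty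
                        then outAcc
                        else outAcc ++ [PySem.Chars.strip ((e.drop start).take (i - start))]) := by
            simp only [pvStepB, hplen, PySem.List.slice_natCast_add]
            congr 1
            omega
          rw [hstep, hnilcur,
            ih (i+5) (i+5) _ (le_refl _) (by omega) (by omega)]
          -- now rewrite A's side
          conv_rhs => rw [pvLoopA]
          have hm : PySem.List.slice le (some (i : Int)) (some ((i : Int) + 5)) = pvSep :=
            (pv_slice_eq_sep_iff le i).mpr hp
          simp only [h5, dif_pos, hm, if_pos]
          rw [pv_loopA_parts e le le.length (le.length) (i+5) (i+5)
              ([] ++ [PySem.Chars.strip (PySem.List.slice e (some (start : Int)) (some (i : Int)))])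
              (by omega)]
          have hsl : PySem.List.slice e (some (start : Int)) (some (i : Int))
              = (e.drop start).take (i - start) := by
            rw [PySem.List.slice_natCast]
          rw [hsl]
          simp only [List.nil_append, List.filter_append, List.filter_cons, List.filter_nil]
          by_cases hemp : (PySem.Chars.strip ((e.drop start).take (i - start))).isEmpty
          · simp [hemp]
          · simp [hemp, List.append_assoc]
        · -- no separator at i: advance one char
          have hp' : pvSep.isPrefixOf (c :: rest) = false := by
            rw [Bool.eq_false_iff]
            intro h
            exact hp (hl ▸ List.isPrefixOf_iff_prefix.mp h)
          simp only [hp', Bool.false_eq_true, if_false]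
          have hrest : rest = le.drop (i + 1) := by
            have : List.drop 1 (le.drop i) = le.drop (i + 1) := List.drop_drop ..
            rw [hl] at this
            simpa using this
          have hcur : (c :: ((le.drop start).take (i - start)).reverse)
              = ((le.drop start).take ((i + 1) - start)).reverse := by
            have hgi : le[i]? = some c := by
              have : (le.drop i)[0]? = le[i + 0]? := List.getElem?_drop ..
              rw [hl] at this
              simpa using this.symm
            have htake : (le.drop start).take ((i + 1) - start)
                = (le.drop start).take (i - start) ++ [c] := by
              have h1 : (i + 1) - start = (i - start) + 1 := by omega
              rw [h1, List.take_add_one]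
              have : (le.drop start)[i - start]? = some c := by
                rw [List.getElem?_drop]
                have : start + (i - start) = i := by omega
                rw [this, ← Nat.add_zero i] at *
                simpa using hgi
              simp [this]
            rw [htake, List.reverse_append]
            simp
          rw [hrest, hcur, ih (i+1) start outAcc (by omega) (by omega) (by omega)]
          conv_rhs => rw [pvLoopA]
          have hm : ¬ PySem.List.slice le (some (i : Int)) (some ((i : Int) + 5)) = pvSep := by
            rw [pv_slice_eq_sep_iff]
            exact hp
          simp only [h5, dif_pos, hm, if_false]
      · exact pv_main_short e le hlen (f+1) i start outAcc hsi hin (by omega)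

-- ===== VERDICT (by name: the statement is the Claim_ definition above) =====
theorem split_condition_by_and_py_spec : Claim_equal_split_condition_by_and_py := by
  intro expr _
  unfold Spec_split_condition_by_and_py split_condition_by_and_py split_condition_by_and_py_alt
  by_cases hn : expr.toList.length = 0
  · have he0 : expr.toList = [] := List.length_eq_zero_iff.mp hn
    rw [he0]
    decide
  · simp only [hn, if_false]
    have hlen : expr.toList.length = (PySem.Chars.lower expr.toList).length := by
      simp [PySem.Chars.lower]
    have hsplit : PySem.Chars.splitOn (PySem.Chars.lower expr.toList) pvSep
        = PySem.Chars.splitOn.go pvSep ((PySem.Chars.lower expr.toList).length + 1)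
            (PySem.Chars.lower expr.toList) [] [] := rfl
    have hmain := pv_main expr.toList (PySem.Chars.lower expr.toList) hlen
      ((PySem.Chars.lower expr.toList).length + 1) 0 0 []
      (le_refl 0) (Nat.zero_le _) (by omega)
    simp only [List.drop_zero, Nat.sub_zero, List.take_zero, List.reverse_nil,
      List.nil_append] at hmain
    rw [hsplit, hmain, ← hlen]
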